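-- pv_equiv track=rewrite | github.com/Shikher-jain/SJ_MAIN | Problem Solving/GFG/September 2024/gfg20_09_02.py | countBuildingsWithSunrise
-- ===== SOURCE A (Python) =====
-- def countBuildingsWithSunrise(a):
--     ans = 1
--     m = a[0]
--     for i in range(1, len(a)):
--         if a[i] > m:
--             ans += 1
--             m = a[i]
--
--     return ans
-- ===== SOURCE B (Python) =====
-- def countBuildingsWithSunrise(a):
--     # A building sees the sunrise iff every building before it is strictly shorter.
--     return sum(1 for i, x in enumerate(a) if all(p < x for p in a[:i]))
-- ===== Notes on version B (the rewrite author's own statement) =====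
-- stated objective: alternative
-- what changed: Replaces A's fused single pass tracking a running maximum with a direct per-building check: count the buildings for which every earlier building is strictly shorter (enumerate + all over the prefix).
import Mathlib
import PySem

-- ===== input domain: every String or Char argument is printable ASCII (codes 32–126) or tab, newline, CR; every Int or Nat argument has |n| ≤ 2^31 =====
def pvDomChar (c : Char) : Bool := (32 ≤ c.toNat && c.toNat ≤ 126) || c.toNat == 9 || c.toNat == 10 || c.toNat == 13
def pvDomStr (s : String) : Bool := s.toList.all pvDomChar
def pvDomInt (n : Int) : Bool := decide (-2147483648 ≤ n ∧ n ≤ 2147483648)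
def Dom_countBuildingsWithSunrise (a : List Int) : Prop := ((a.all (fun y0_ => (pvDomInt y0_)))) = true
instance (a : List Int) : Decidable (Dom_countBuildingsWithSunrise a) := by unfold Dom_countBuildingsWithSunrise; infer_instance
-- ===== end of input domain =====

-- B counts records directly (each building checked against all earlier ones) instead of A's
-- fused running-maximum loop; objective: alternative (A is O(n), B is O(n^2)).


-- ===== PORT A =====
-- ans = 1; m = a[0]; for i in range(1, len(a)): if a[i] > m: ans += 1; m = a[i]; return ans
def countBuildingsWithSunrise (a : List Int) : Int :=
  (((PySem.List.pyRange 1 a.length 1).foldl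
      (fun (s : Int × Int) i =>
        if PySem.List.pyGetD a i 0 > s.2 then (s.1 + 1, PySem.List.pyGetD a i 0) else s)
      (1, PySem.List.pyGetD a 0 0))).1

-- ===== PORT B =====
-- return sum(1 for i, x in enumerate(a) if all(p < x for p in a[:i]))
def countBuildingsWithSunrise_alt (a : List Int) : Int :=
  ((PySem.List.enumerate a 0).map
    (fun p => if (PySem.List.slice a (some 0) (some p.1)).all (fun q => q < p.2) then (1 : Int) else 0)).sum

-- ===== PRECONDITION & SPEC =====
-- Pre_ excludes only the empty list, on which Python A raises IndexError reading the first element.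
def Pre_countBuildingsWithSunrise (a : List Int) : Prop := a ≠ []
instance (a : List Int) : Decidable (Pre_countBuildingsWithSunrise a) := by unfold Pre_countBuildingsWithSunrise; infer_instance
def pvWitness_countBuildingsWithSunrise : List Int := [3, 1, 4, 4, 7]

def Spec_countBuildingsWithSunrise (a : List Int) (out : Int) : Prop := out = countBuildingsWithSunrise_alt a
instance (a : List Int) (out : Int) : Decidable (Spec_countBuildingsWithSunrise a out) := by unfold Spec_countBuildingsWithSunrise; infer_instance

-- ===== CLAIM (what is proved, stated in full; the proofs are below) =====
def Claim_equal_countBuildingsWithSunrise : Prop := ∀ (a : List Int), Dom_countBuildingsWithSunrise a → Pre_countBuildingsWithSunrise a → Spec_countBuildingsWithSunrise a (countBuildingsWithSunrise a)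

-- ===== LEMMAS AND PROOFS =====

-- Reference count: records of ys relative to a running maximum m.
def recCount (m : Int) : List Int → Int
  | [] => 0
  | y :: ys => (if m < y then 1 else 0) + recCount (max m y) ys

-- A's fold equals ans plus recCount.
lemma foldA_recCount (ys : List Int) : ∀ (ans m : Int),
    (ys.foldl (fun (s : Int × Int) x => if x > s.2 then (s.1 + 1, x) else s) (ans, m)).1
      = ans + recCount m ys := by
  induction ys with
  | nil => intro ans m; simp [recCount]
  | cons y ys ih =>
    intro ans m
    simp only [List.foldl_cons, recCount]
    by_cases h : m < y
    · rw [if_pos (by exact h), if_pos h, max_eq_right h.le, ih]; ring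
    · rw [if_neg (by exact h), if_neg h, max_eq_left (not_lt.mp h), ih]; ring

-- B's enumerate/slice sum over the suffix ys of a = pre ++ ys equals recCount m ys,
-- provided m is the maximum of the nonempty prefix pre.
lemma sumB_recCount (ys : List Int) : ∀ (pre : List Int) (m : Int), m ∈ pre → (∀ p ∈ pre, p ≤ m) →
    ((PySem.List.enumerate ys (pre.length : Int)).map
      (fun p => if (PySem.List.slice (pre ++ ys) (some 0) (some p.1)).all (fun q => q < p.2) then (1 : Int) else 0)).sum
      = recCount m ys := by
  induction ys with
  | nil => intro pre m _ _; simp [PySem.List.enumerate_nil, recCount]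
  | cons y ys ih =>
    intro pre m hmem hub
    rw [PySem.List.enumerate_cons]
    simp only [List.map_cons, List.sum_cons, recCount]
    have hslice : PySem.List.slice (pre ++ y :: ys) (some (0:Int)) (some ((pre.length : Int))) = pre := by
      rw [PySem.List.slice_zero_start, PySem.List.slice_to_natCast]
      simp
    have hcond : (PySem.List.slice (pre ++ y :: ys) (some (0:Int)) (some ((pre.length : Int)))).all (fun q => q < y)
        = decide (m < y) := by
      rw [hslice]
      by_cases h : m < y
      · simp only [h, decide_true, List.all_eq_true]
        intro q hq
        exact decide_eq_true (lt_of_le_of_lt (hub q hq) h)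
      · simp only [h, decide_false]
        rw [List.all_eq_false]
        exact ⟨m, hmem, by simp [h]⟩
    have hrec : pre ++ y :: ys = (pre ++ [y]) ++ ys := by simp
    have hlen : (pre.length : Int) + 1 = (((pre ++ [y]).length : Int)) := by simp
    have htail := ih (pre ++ [y]) (max m y)
      (by rcases le_total y m with h | h
          · rw [max_eq_left h]; exact List.mem_append_left _ hmem
          · rw [max_eq_right h]; exact List.mem_append_right _ (by simp))
      (by intro p hp
          rcases List.mem_append.mp hp with h | h
          · exact le_trans (hub p h) (le_max_left _ _)
          · simp at h; subst h; exact le_max_right _ _)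
    rw [hcond, hlen, hrec, htail]
    by_cases h : m < y <;> simp [h]

lemma A_eq (x : Int) (xs : List Int) :
    countBuildingsWithSunrise (x :: xs) = 1 + recCount x xs := by
  unfold countBuildingsWithSunrise
  rw [PySem.List.foldl_pyRange_pyGetD' (x :: xs) 0
        (fun (s : Int × Int) v => if v > s.2 then (s.1 + 1, v) else s)
        (1, PySem.List.pyGetD (x :: xs) 0 0) (a := 1) (by norm_num)]
  simp only [PySem.List.pyGetD_zero_cons]
  have h1 : (x :: xs).drop (1:Int).toNat = xs := by simp
  rw [h1, foldA_recCount]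

lemma B_eq (x : Int) (xs : List Int) :
    countBuildingsWithSunrise_alt (x :: xs) = 1 + recCount x xs := by
  unfold countBuildingsWithSunrise_alt
  rw [PySem.List.enumerate_cons]
  simp only [List.map_cons, List.sum_cons]
  have h0 : PySem.List.slice (x :: xs) (some (0:Int)) (some (0:Int)) = ([] : List Int) := by
    rw [PySem.List.slice_zero_start, PySem.List.slice_to (x :: xs) le_rfl]
    simp
  rw [h0, show (0:Int) + 1 = 1 from rfl]
  have hsum := sumB_recCount xs [x] x (by simp) (by simp)
  simp only [List.length_singleton, Nat.cast_one, List.singleton_append] at hsum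
  simp only [List.all_nil, if_true]
  exact congrArg (fun t => 1 + t) hsum

-- ===== VERDICT (by name: the statement is the Claim_ definition above) =====
theorem countBuildingsWithSunrise_spec : Claim_equal_countBuildingsWithSunrise := by
  intro a _ hpre
  unfold Spec_countBuildingsWithSunrise
  cases a with
  | nil => exact absurd rfl hpre
  | cons x xs => rw [A_eq, B_eq]
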